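-- pv_equiv track=rewrite | github.com/GeorgeBannister/AdventofCode2023 | day5.py | part_2_steps_rec
-- ===== SOURCE A (Python) =====
-- def part_2_steps_rec(
--     inp: int, maps: list[tuple[int]], depth, seed_pairs: tuple[int, int]
-- ) -> bool:
--     if depth == -1:
--         return any(inp in range(seed[0], seed[0] + seed[1]) for seed in seed_pairs)
--     val = None
--     inp_mapped = False
--     for triple in maps[depth]:
--         dest_start, source_start, map_range = triple
--         if inp in range(dest_start, dest_start + map_range):
--             val = inp + source_start - dest_start
--             inp_mapped = True
--     if not inp_mapped:
--         val = inp
--     return part_2_steps_rec(val, maps, depth - 1, seed_pairs)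
-- ===== SOURCE B (Python) =====
-- def part_2_steps_rec(
--     inp: int, maps: list[tuple[int]], depth, seed_pairs: tuple[int, int]
-- ) -> bool:
--     # Iterative: thread the value down through the layers, then test the seed ranges.
--     val = inp
--     for d in range(depth, -1, -1):
--         cur = val
--         for dest_start, source_start, map_range in maps[d]:
--             if dest_start <= cur < dest_start + map_range:
--                 val = cur + source_start - dest_start  # last match wins, like A
--         # no match: val is still cur (passthrough)
--     return any(s[0] <= val < s[0] + s[1] for s in seed_pairs)
-- ===== Notes on version B (the rewrite author's own statement) =====
-- stated objective: simpler
-- what changed: Replaces the recursion on depth with an iterative countdown loop threading a single int value (no Option/flag pair: the inner scan keeps last-match-wins by overwriting, passthrough by starting from the current value), followed by one seed-range check.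
import Mathlib
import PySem

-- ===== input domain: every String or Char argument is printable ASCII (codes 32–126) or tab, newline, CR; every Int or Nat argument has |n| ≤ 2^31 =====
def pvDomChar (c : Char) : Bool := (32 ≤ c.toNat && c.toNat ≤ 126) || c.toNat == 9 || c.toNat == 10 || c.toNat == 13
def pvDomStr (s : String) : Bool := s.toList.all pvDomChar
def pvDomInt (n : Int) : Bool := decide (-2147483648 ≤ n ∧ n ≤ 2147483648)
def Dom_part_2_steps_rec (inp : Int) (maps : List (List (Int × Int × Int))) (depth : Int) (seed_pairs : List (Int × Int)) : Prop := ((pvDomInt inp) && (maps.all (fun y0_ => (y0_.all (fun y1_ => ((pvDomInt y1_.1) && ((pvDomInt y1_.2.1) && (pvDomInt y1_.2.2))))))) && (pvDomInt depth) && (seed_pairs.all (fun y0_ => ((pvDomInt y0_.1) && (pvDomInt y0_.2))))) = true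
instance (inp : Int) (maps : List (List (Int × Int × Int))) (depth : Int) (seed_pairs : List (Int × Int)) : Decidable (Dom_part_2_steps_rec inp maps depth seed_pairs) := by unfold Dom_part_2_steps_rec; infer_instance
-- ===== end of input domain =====

-- B replaces A's recursion on depth with an iterative countdown loop threading one int value; objective: simpler.


-- ===== PORT A =====
-- A's recursion decreases depth by 1 until -1; ported with fuel (depth+1).toNat, which matches
-- A exactly on Pre_ (-1 ≤ depth < maps.length); maps[depth] is maps.getD n [] (index valid on Pre_).
def p2aGo (maps : List (List (Int × Int × Int))) (seed_pairs : List (Int × Int)) : Nat → Int → Bool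
  | 0, inp => seed_pairs.any (fun seed => decide (seed.1 ≤ inp ∧ inp < seed.1 + seed.2))
  | n+1, inp =>
    let st := (maps.getD n []).foldl
      (fun (acc : Option Int × Bool) triple =>
        if triple.1 ≤ inp ∧ inp < triple.1 + triple.2.2 then
          (some (inp + triple.2.1 - triple.1), true)
        else acc)
      (none, false)
    let val := if st.2 then st.1.getD inp else inp
    p2aGo maps seed_pairs n val

def part_2_steps_rec (inp : Int) (maps : List (List (Int × Int × Int))) (depth : Int) (seed_pairs : List (Int × Int)) : Bool :=
  p2aGo maps seed_pairs (depth + 1).toNat inp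

-- ===== PORT B =====
def part_2_steps_rec_alt (inp : Int) (maps : List (List (Int × Int × Int))) (depth : Int) (seed_pairs : List (Int × Int)) : Bool :=
  let val := (PySem.List.pyRange depth (-1) (-1)).foldl
    (fun cur d =>
      (maps.getD d.toNat []).foldl
        (fun v triple =>
          if triple.1 ≤ cur ∧ cur < triple.1 + triple.2.2 then
            cur + triple.2.1 - triple.1
          else v)
        cur)
    inp
  seed_pairs.any (fun s => decide (s.1 ≤ val ∧ val < s.1 + s.2))

-- ===== PRECONDITION & SPEC =====
-- Pre_ excludes exactly the inputs where Python A raises IndexError: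
-- depth ≥ len(maps) indexes past the end at once, and depth < -1 wraps negative indices until it runs out.
def Pre_part_2_steps_rec (inp : Int) (maps : List (List (Int × Int × Int))) (depth : Int) (seed_pairs : List (Int × Int)) : Prop :=
  -1 ≤ depth ∧ depth < maps.length
instance (inp : Int) (maps : List (List (Int × Int × Int))) (depth : Int) (seed_pairs : List (Int × Int)) : Decidable (Pre_part_2_steps_rec inp maps depth seed_pairs) := by unfold Pre_part_2_steps_rec; infer_instance
def pvWitness_part_2_steps_rec : Int × (List (List (Int × Int × Int))) × Int × (List (Int × Int)) :=
  (0, [[(0, 5, 3)]], 0, [(5, 1)])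

def Spec_part_2_steps_rec (inp : Int) (maps : List (List (Int × Int × Int))) (depth : Int) (seed_pairs : List (Int × Int)) (out : Bool) : Prop := out = part_2_steps_rec_alt inp maps depth seed_pairs
instance (inp : Int) (maps : List (List (Int × Int × Int))) (depth : Int) (seed_pairs : List (Int × Int)) (out : Bool) : Decidable (Spec_part_2_steps_rec inp maps depth seed_pairs out) := by unfold Spec_part_2_steps_rec; infer_instance

-- ===== CLAIM (what is proved, stated in full; the proofs are below) =====
def Claim_equal_part_2_steps_rec : Prop := ∀ (inp : Int) (maps : List (List (Int × Int × Int))) (depth : Int) (seed_pairs : List (Int × Int)), Dom_part_2_steps_rec inp maps depth seed_pairs → Pre_part_2_steps_rec inp maps depth seed_pairs → Spec_part_2_steps_rec inp maps depth seed_pairs (part_2_steps_rec inp maps depth seed_pairs)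

-- ===== LEMMAS AND PROOFS =====

-- One layer: A's (Option, flag) scan extracts to B's plain-int scan.
theorem p2_inner (inp : Int) (row : List (Int × Int × Int)) :
    ∀ (acc : Option Int × Bool) (w : Int),
      (if acc.2 then acc.1.getD inp else inp) = w →
      (if (row.foldl
          (fun (acc : Option Int × Bool) triple =>
            if triple.1 ≤ inp ∧ inp < triple.1 + triple.2.2 then
              (some (inp + triple.2.1 - triple.1), true)
            else acc) acc).2
        then (row.foldl
          (fun (acc : Option Int × Bool) triple =>
            if triple.1 ≤ inp ∧ inp < triple.1 + triple.2.2 then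
              (some (inp + triple.2.1 - triple.1), true)
            else acc) acc).1.getD inp
        else inp)
      = row.foldl
          (fun v triple =>
            if triple.1 ≤ inp ∧ inp < triple.1 + triple.2.2 then
              inp + triple.2.1 - triple.1
            else v) w := by
  induction row with
  | nil => intro acc w h; simpa using h
  | cons t ts ih =>
    intro acc w h
    simp only [List.foldl_cons]
    by_cases hc : t.1 ≤ inp ∧ inp < t.1 + t.2.2
    · rw [if_pos hc, if_pos hc]
      exact ih _ _ (by simp)
    · rw [if_neg hc, if_neg hc]
      exact ih _ _ h

-- Whole descent: fuel recursion equals the countdown foldl.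
theorem p2_outer (maps : List (List (Int × Int × Int))) (seed_pairs : List (Int × Int)) :
    ∀ (n : Nat) (v : Int),
      p2aGo maps seed_pairs n v =
        (let val := (PySem.List.pyRange ((n : Int) - 1) (-1) (-1)).foldl
            (fun cur d =>
              (maps.getD d.toNat []).foldl
                (fun w triple =>
                  if triple.1 ≤ cur ∧ cur < triple.1 + triple.2.2 then
                    cur + triple.2.1 - triple.1
                  else w) cur) v
         seed_pairs.any (fun s => decide (s.1 ≤ val ∧ val < s.1 + s.2))) := by
  intro n
  induction n with
  | zero =>
    intro v
    rw [show ((0:Nat):Int) - 1 = -1 by norm_num, PySem.List.pyRange_neg_one_eq_nil le_rfl]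
    simp [p2aGo]
  | succ n ih =>
    intro v
    have hr : PySem.List.pyRange ((n.succ : Int) - 1) (-1) (-1)
        = ((n.succ : Int) - 1) :: PySem.List.pyRange ((n.succ : Int) - 1 - 1) (-1) (-1) :=
      PySem.List.pyRange_neg_one_cons (by push_cast; omega)
    have hidx : ((n.succ : Int) - 1).toNat = n := by omega
    have hstep : ((n : Int) - 1) = ((n.succ : Int) - 1 - 1) := by push_cast; omega
    have hin := p2_inner v (maps.getD n []) (none, false) v (by simp)
    simp only [p2aGo]
    rw [ih, hr]
    simp only [List.foldl_cons, hidx, hstep, hin]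

-- ===== VERDICT (by name: the statement is the Claim_ definition above) =====
theorem part_2_steps_rec_spec : Claim_equal_part_2_steps_rec := by
  intro inp maps depth seed_pairs _ hpre
  unfold Spec_part_2_steps_rec part_2_steps_rec part_2_steps_rec_alt
  have hd : ((depth + 1).toNat : Int) - 1 = depth := by
    rcases hpre with ⟨h1, _⟩; omega
  rw [p2_outer, hd]
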